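-- pv_equiv track=rewrite | github.com/Arsen1302/Code-copy-detector | TestData/solutions/problem_1655_5.py | solution_1655_5
-- ===== SOURCE A (Python) =====
-- from typing import List
--
-- def solution_1655_5(nums: List[int]) -> bool:
--     dic = {}
--     for i in range(0,len(nums)-1):
--         s = nums[i] + nums[i+1]
--         if s in dic:
--             return True
--         dic[s] = i
--     return False
-- ===== SOURCE B (Python) =====
-- def solution_1655_5(nums):
--     sums = sorted(a + b for a, b in zip(nums, nums[1:]))
--     return any(x == y for x, y in zip(sums, sums[1:]))
-- ===== Notes on version B (the rewrite author's own statement) =====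
-- stated objective: alternative
-- what changed: Replaces the incremental hash dict with early return by sort-then-scan: build all consecutive-pair sums, sort them, and report whether any two adjacent sorted values are equal.
import Mathlib
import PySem

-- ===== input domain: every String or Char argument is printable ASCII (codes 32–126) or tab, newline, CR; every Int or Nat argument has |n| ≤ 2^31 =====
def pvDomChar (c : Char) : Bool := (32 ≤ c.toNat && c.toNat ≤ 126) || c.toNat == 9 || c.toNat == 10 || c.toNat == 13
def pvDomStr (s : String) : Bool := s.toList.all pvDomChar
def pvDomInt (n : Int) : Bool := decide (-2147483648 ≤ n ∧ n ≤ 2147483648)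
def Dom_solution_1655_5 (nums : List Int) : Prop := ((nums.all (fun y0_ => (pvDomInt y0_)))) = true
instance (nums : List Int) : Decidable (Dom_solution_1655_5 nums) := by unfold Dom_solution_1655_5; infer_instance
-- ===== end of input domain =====

-- B replaces A's incremental dict with early return by sort-then-adjacent-scan over the pair sums (alternative algorithm; same result).

-- ===== PORT A =====
-- A's loop: for i in range(0, len(nums)-1): s = nums[i]+nums[i+1]; early return on repeat, else dic[s] = i
def loopA_1655 (nums : List Int) (n : Nat) (i : Nat) (dic : PySem.Dict Int Int) : Bool :=
  if i < n then
    let s := PySem.List.pyGetD nums (i : Int) 0 + PySem.List.pyGetD nums ((i : Int) + 1) 0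
    if dic.contains s then true
    else loopA_1655 nums n (i + 1) (dic.insert s (i : Int))
  else false
termination_by n - i

def solution_1655_5 (nums : List Int) : Bool :=
  loopA_1655 nums (nums.length - 1) 0 PySem.Dict.empty

-- ===== PORT B =====
-- any(x == y for x, y in zip(sums, sums[1:]))
def adjEq1655 : List Int → Bool
  | a :: b :: rest => a == b || adjEq1655 (b :: rest)
  | _ => false

-- sums = sorted(a + b for a, b in zip(nums, nums[1:]))
def solution_1655_5_alt (nums : List Int) : Bool :=
  let sums := PySem.List.sorted (List.zipWith (· + ·) nums nums.tail) (fun x => x) false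
  adjEq1655 sums

-- ===== PRECONDITION & SPEC =====
def Spec_solution_1655_5 (nums : List Int) (out : Bool) : Prop := out = solution_1655_5_alt nums
instance (nums : List Int) (out : Bool) : Decidable (Spec_solution_1655_5 nums out) := by unfold Spec_solution_1655_5; infer_instance

-- ===== CLAIM =====
def Claim_equal_solution_1655_5 : Prop := ∀ (nums : List Int), Dom_solution_1655_5 nums → Spec_solution_1655_5 nums (solution_1655_5 nums)

-- ===== LEMMAS AND PROOFS =====

-- structural middleman: A's loop seen as a scan over the remaining pair sums
def hasDup_1655 : List Int → List Int → Bool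
  | [], _ => false
  | s :: rest, seen => if s ∈ seen then true else hasDup_1655 rest (seen ++ [s])

theorem hasDup_eq_nodup (l : List Int) : ∀ (seen : List Int), seen.Nodup →
    hasDup_1655 l seen = decide (¬ (seen ++ l).Nodup) := by
  induction l with
  | nil => intro seen hnd; simp [hasDup_1655, hnd]
  | cons s rest ih =>
      intro seen hnd
      by_cases hmem : s ∈ seen
      · have : ¬ (seen ++ s :: rest).Nodup := by
          intro h
          rcases (List.nodup_append.mp h) with ⟨_, _, hdisj⟩
          exact hdisj s hmem s (by simp) rfl
        simp [hasDup_1655, hmem, this]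
      · have hnd' : (seen ++ [s]).Nodup := by
          simp [List.nodup_append, hnd]
          intro a ha hc; exact hmem (hc ▸ ha)
        have hperm : (seen ++ [s] ++ rest) = seen ++ s :: rest := by simp
        rw [hasDup_1655]
        simp only [if_neg hmem]
        rw [ih (seen ++ [s]) hnd', hperm]

-- values of the pair-sum list
theorem sums_getElem (nums : List Int) (i : Nat)
    (h : i < (List.zipWith (· + ·) nums nums.tail).length) :
    (List.zipWith (· + ·) nums nums.tail)[i] =
      PySem.List.pyGetD nums (i : Int) 0 + PySem.List.pyGetD nums ((i : Int) + 1) 0 := by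
  have hlen : (List.zipWith (· + ·) nums nums.tail).length = nums.length - 1 := by
    simp [List.length_zipWith]
  have hi : i < nums.length - 1 := hlen ▸ h
  have h1 : i < nums.length := by omega
  have h2 : i + 1 < nums.length := by omega
  have ht : i < nums.tail.length := by simp [List.length_tail]; omega
  rw [List.getElem_zipWith]
  have : ((i : Int) + 1) = ((i + 1 : Nat) : Int) := by push_cast; ring
  rw [this, PySem.List.pyGetD_natCast, PySem.List.pyGetD_natCast,
      List.getD_eq_getElem _ _ h1, List.getD_eq_getElem _ _ h2,
      List.getElem_tail]

-- A's index loop computes the structural scan over the dropped sum list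
theorem loopA_eq_hasDup (nums : List Int) :
    ∀ (k i : Nat) (dic : PySem.Dict Int Int), (nums.length - 1) - i = k →
    loopA_1655 nums (nums.length - 1) i dic =
      hasDup_1655 ((List.zipWith (· + ·) nums nums.tail).drop i) dic.keys := by
  intro k
  induction k with
  | zero =>
      intro i dic hk
      have hge : nums.length - 1 ≤ i := by omega
      have hlen : (List.zipWith (· + ·) nums nums.tail).length = nums.length - 1 := by
        simp [List.length_zipWith]
      rw [loopA_1655]
      rw [List.drop_eq_nil_of_le (by omega)]
      simp [hasDup_1655, Nat.not_lt.mpr hge]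
  | succ k ih =>
      intro i dic hk
      have hlt : i < nums.length - 1 := by omega
      have hlen : (List.zipWith (· + ·) nums nums.tail).length = nums.length - 1 := by
        simp [List.length_zipWith]
      have hi : i < (List.zipWith (· + ·) nums nums.tail).length := by omega
      rw [loopA_1655, if_pos hlt]
      rw [List.drop_eq_getElem_cons hi]
      rw [sums_getElem nums i hi] at *
      set s := PySem.List.pyGetD nums (i : Int) 0 + PySem.List.pyGetD nums ((i : Int) + 1) 0 with hs
      by_cases hmem : s ∈ dic.keys
      · rw [if_pos (by rw [PySem.Dict.contains_iff_mem_keys]; exact hmem)]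
        simp [hasDup_1655, hmem]
      · rw [if_neg (by simp only [PySem.Dict.contains_iff_mem_keys]; exact hmem)]
        rw [ih (i + 1) (dic.insert s (i : Int)) (by omega)]
        have hcf : dic.contains s = false := by
          rw [Bool.eq_false_iff]
          simp only [ne_eq, PySem.Dict.contains_iff_mem_keys]
          exact hmem
        have hkeys : (dic.insert s (i : Int)).keys = dic.keys ++ [s] := by
          rw [PySem.Dict.keys_insert_of_not_contains]
          exact hcf
        rw [hkeys]
        simp [hasDup_1655, hmem]

-- B's adjacent scan on a weakly increasing list detects exactly non-Nodup
theorem adjEq_pairwise (l : List Int) (hp : l.Pairwise (· ≤ ·)) :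
    adjEq1655 l = decide (¬ l.Nodup) := by
  induction l with
  | nil => simp [adjEq1655]
  | cons a tail ih =>
      cases tail with
      | nil => simp [adjEq1655]
      | cons b rest =>
          have hp' : (b :: rest).Pairwise (· ≤ ·) := hp.tail
          have hab : a ≤ b := (List.pairwise_cons.mp hp).1 b (by simp)
          by_cases heq : a = b
          · have : ¬ (a :: b :: rest).Nodup := by
              intro h; exact (List.nodup_cons.mp h).1 (by simp [heq])
            simp [adjEq1655, heq, this]
          · have hnotmem : a ∉ b :: rest := by
              intro hm
              rcases List.mem_cons.mp hm with h | h
              · exact heq h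
              · have hbx : b ≤ a := (List.pairwise_cons.mp hp').1 a h
                exact heq (le_antisymm hab hbx)
            have hiff : (a :: b :: rest).Nodup ↔ (b :: rest).Nodup := by
              simp [List.nodup_cons, hnotmem]
            have hbeq : (a == b) = false := by simp [heq]
            rw [adjEq1655, ih hp', hbeq]
            simp [hiff]

-- ===== VERDICT =====
theorem solution_1655_5_spec : Claim_equal_solution_1655_5 := by
  intro nums _
  unfold Spec_solution_1655_5 solution_1655_5 solution_1655_5_alt
  rw [loopA_eq_hasDup nums ((nums.length - 1) - 0) 0 PySem.Dict.empty rfl]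
  have hkeys : (PySem.Dict.empty : PySem.Dict Int Int).keys = [] := rfl
  rw [hkeys, List.drop_zero, hasDup_eq_nodup _ [] List.nodup_nil]
  set sums := List.zipWith (· + ·) nums nums.tail with hs
  rw [adjEq_pairwise _ (by simpa using PySem.List.sorted_pairwise sums (fun x => x))]
  have hperm : (PySem.List.sorted sums (fun x => x) false).Perm sums :=
    PySem.List.sorted_perm sums (fun x => x) false
  simp [hperm.nodup_iff]
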